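-- pv_equiv track=rewrite | github.com/LyttonFeng/pinchbench-skill | rl/agent_loop/task16_event_reward/reward_task16_event_only_v2.py | _window_around_email
-- ===== SOURCE A (Python) =====
-- def _lower(s: str | None) -> str:
--     return (s or "").lower()
--
-- def _email_patterns(email_id: str) -> list[str]:
--     suffix = email_id.split("_", 1)[-1]
--     return [
--         email_id.lower(),
--         f"{email_id.lower()}.txt",
--         f"email {suffix}",
--         f"email-{suffix}",
--     ]
--
-- def _window_around_email(content: str, email_id: str, radius: int = 500) -> str:
--     text = _lower(content)
--     positions = [text.find(pattern) for pattern in _email_patterns(email_id)]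
--     positions = [p for p in positions if p >= 0]
--     if not positions:
--         return ""
--     pos = min(positions)
--     return text[max(0, pos - radius) : pos + radius]
-- ===== SOURCE B (Python) =====
-- def _window_around_email(content, email_id, radius=500):
--     text = (content or "").lower()
--     eid = email_id.lower()
--     suffix = email_id.split("_", 1)[-1]
--     pats = (eid, eid + ".txt", "email " + suffix, "email-" + suffix)
--     # single left-to-right scan: stop at the first position where any pattern begins
--     for pos in range(len(text) + 1):
--         if text.startswith(pats, pos):
--             return text[max(0, pos - radius): pos + radius]
--     return ""
-- ===== Notes on version B (the rewrite author's own statement) =====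
-- stated objective: alternative
-- what changed: B replaces A's four independent full-text find() passes plus min() by a single left-to-right scan over positions with early return at the first position where any of the four patterns begins (str.startswith with a tuple).
import Mathlib
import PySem

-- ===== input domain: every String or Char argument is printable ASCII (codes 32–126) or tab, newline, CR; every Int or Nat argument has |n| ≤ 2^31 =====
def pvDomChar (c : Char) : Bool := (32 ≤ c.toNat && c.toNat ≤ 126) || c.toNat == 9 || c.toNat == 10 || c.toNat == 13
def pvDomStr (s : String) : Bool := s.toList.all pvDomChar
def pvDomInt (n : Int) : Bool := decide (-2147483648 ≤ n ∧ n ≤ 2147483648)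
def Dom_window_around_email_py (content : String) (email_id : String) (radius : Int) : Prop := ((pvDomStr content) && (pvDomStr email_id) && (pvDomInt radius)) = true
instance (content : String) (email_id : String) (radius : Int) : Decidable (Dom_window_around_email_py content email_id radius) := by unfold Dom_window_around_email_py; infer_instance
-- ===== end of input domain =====

-- B replaces A's four independent full-text find() passes plus min() by ONE left-to-right
-- scan over positions that returns at the first position where any pattern begins;
-- objective: alternative (a single online scan instead of four staged passes).

-- ===== PORT A =====

-- _lower: (s or "").lower()   (content : str here, so 's or ""' is s unless s is empty)
def lowerPyA (s : String) : List Char :=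
  PySem.Chars.lower (if s.toList = [] then [] else s.toList)

-- _email_patterns: suffix = email_id.split("_", 1)[-1]; [-1] ported as pyGet? … (-1)
-- (split always returns a nonempty list, so .getD [] is never the value Python lacks)
def emailPatternsA (email_id : String) : List (List Char) :=
  let suffix := (PySem.List.pyGet? (PySem.Chars.splitOnMax email_id.toList "_".toList 1) (-1)).getD []
  [ PySem.Chars.lower email_id.toList,
    PySem.Chars.lower email_id.toList ++ ".txt".toList,
    "email ".toList ++ suffix,
    "email-".toList ++ suffix ]

-- positions = [text.find(p) for p in patterns]; keep p >= 0; if none: ""; pos = min(positions)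
-- ('if not positions: return ""' is the none case of min?, which is none exactly on [])
def window_around_email_py (content : String) (email_id : String) (radius : Int) : String :=
  let text := lowerPyA content
  let positions := (emailPatternsA email_id).map (fun p => PySem.Chars.find text p)
  let positions := positions.filter (fun p => decide (0 ≤ p))
  match PySem.List.min? positions (fun p => p) with
  | none => ""
  | some pos =>
      String.ofList (PySem.Chars.slice text (some (max 0 (pos - radius))) (some (pos + radius)))

-- ===== PORT B =====

-- Source B's 'for pos in range(len(text)+1): if text.startswith(pats, pos): return …':
-- structural recursion on the remaining text, i = current position; text.startswith(p, pos)
-- is 'p is a prefix of the text from pos', i.e. startswith on the drop — exact for these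
-- literal patterns.  The nil case is position len(text) (range goes to len(text) inclusive).
def altScan (pats : List (List Char)) (s : List Char) (i : Int) : Option Int :=
  if pats.any (fun p => PySem.Chars.startswith s p) then some i
  else
    match s with
    | [] => none
    | _ :: t => altScan pats t (i + 1)

def window_around_email_py_alt (content : String) (email_id : String) (radius : Int) : String :=
  let text := PySem.Chars.lower (if content.toList = [] then [] else content.toList)
  let eid := PySem.Chars.lower email_id.toList
  let suffix := (PySem.List.pyGet? (PySem.Chars.splitOnMax email_id.toList "_".toList 1) (-1)).getD []
  let patterns := [eid, eid ++ ".txt".toList, "email ".toList ++ suffix, "email-".toList ++ suffix]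
  match altScan patterns text 0 with
  | none => ""
  | some pos =>
      String.ofList (PySem.Chars.slice text (some (max 0 (pos - radius))) (some (pos + radius)))

-- ===== PRECONDITION & SPEC =====
def Spec_window_around_email_py (content : String) (email_id : String) (radius : Int) (out : String) : Prop := out = window_around_email_py_alt content email_id radius
instance (content : String) (email_id : String) (radius : Int) (out : String) : Decidable (Spec_window_around_email_py content email_id radius out) := by unfold Spec_window_around_email_py; infer_instance

-- ===== CLAIM (what is proved, stated in full; the proofs are below) =====
def Claim_equal_window_around_email_py : Prop := ∀ (content : String) (email_id : String) (radius : Int), Dom_window_around_email_py content email_id radius → Spec_window_around_email_py content email_id radius (window_around_email_py content email_id radius)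

-- ===== LEMMAS AND PROOFS =====

-- If no pattern occurs anywhere in s, the scan finds nothing.
lemma altScan_eq_none (pats : List (List Char)) (s : List Char) (i : Int)
    (h : ∀ p ∈ pats, ¬ p <:+: s) : altScan pats s i = none := by
  induction s generalizing i with
  | nil =>
      rw [altScan]
      have hc : pats.any (fun p => PySem.Chars.startswith [] p) = false := by
        rw [List.any_eq_false]
        intro p hp htrue
        exact h p hp ((PySem.Chars.startswith_iff [] p).1 htrue).isInfix
      simp [hc]
  | cons c t ih =>
      rw [altScan]
      have hc : pats.any (fun p => PySem.Chars.startswith (c :: t) p) = false := by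
        rw [List.any_eq_false]
        intro p hp htrue
        exact h p hp ((PySem.Chars.startswith_iff _ p).1 htrue).isInfix
      simp only [hc]
      exact ih (i + 1) (fun p hp hinf => h p hp (hinf.trans (List.suffix_cons c t).isInfix))

-- If some pattern matches at offset k and none matches earlier, the scan stops at i + k.
lemma altScan_eq_some (pats : List (List Char)) (s : List Char) (i : Int) (k : Nat)
    (hmatch : ∃ p ∈ pats, p <+: s.drop k)
    (hmin : ∀ j, j < k → ∀ p ∈ pats, ¬ p <+: s.drop j) :
    altScan pats s i = some (i + k) := by
  induction s generalizing i k with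
  | nil =>
      obtain ⟨p, hp, hpre⟩ := hmatch
      have hk0 : k = 0 := by
        by_contra hne
        exact hmin 0 (Nat.pos_of_ne_zero hne) p hp (by simpa using hpre)
      subst hk0
      rw [altScan]
      have : pats.any (fun p => PySem.Chars.startswith [] p) = true := by
        refine List.any_eq_true.2 ⟨p, hp, ?_⟩
        simpa [PySem.Chars.startswith_iff] using hpre
      simp [this]
  | cons c t ih =>
      cases k with
      | zero =>
          obtain ⟨p, hp, hpre⟩ := hmatch
          rw [altScan]
          have : pats.any (fun p => PySem.Chars.startswith (c :: t) p) = true := by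
            refine List.any_eq_true.2 ⟨p, hp, ?_⟩
            simpa [PySem.Chars.startswith_iff] using hpre
          simp [this]
      | succ k' =>
          rw [altScan]
          have hc : pats.any (fun p => PySem.Chars.startswith (c :: t) p) = false := by
            rw [List.any_eq_false]
            intro p hp htrue
            exact hmin 0 (Nat.succ_pos k') p hp (by simpa using (PySem.Chars.startswith_iff _ p).1 htrue)
          simp only [hc]
          have := ih (i + 1) k' (by simpa using hmatch)
            (fun j hj p hp hpre => hmin (j + 1) (Nat.succ_lt_succ hj) p hp (by simpa using hpre))
          rw [this]
          exact congrArg some (by push_cast; omega)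

-- The scan from 0 computes exactly min([text.find(p) for p in pats if find >= 0]).
lemma altScan_eq_min (pats : List (List Char)) (text : List Char) :
    altScan pats text 0 =
      PySem.List.min? ((pats.map (fun p => PySem.Chars.find text p)).filter
        (fun p => decide (0 ≤ p))) (fun p => p) := by
  set F := (pats.map (fun p => PySem.Chars.find text p)).filter (fun p => decide (0 ≤ p)) with hF
  rcases hFe : PySem.List.min? F (fun p => p) with _ | m
  · -- no pattern occurs: every find is negative, i.e. no pattern is an infix
    have hnil : F = [] := (PySem.List.min?_eq_none_iff F _).1 hFe
    refine altScan_eq_none pats text 0 (fun p hp hinf => ?_)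
    have h0 : (0 : Int) ≤ PySem.Chars.find text p := (PySem.Chars.find_nonneg_iff text p).2 hinf
    have hmem : PySem.Chars.find text p ∈ F := by
      rw [hF, List.mem_filter]
      exact ⟨List.mem_map.2 ⟨p, hp, rfl⟩, by simpa using h0⟩
    rw [hnil] at hmem
    exact absurd hmem (List.not_mem_nil)
  · -- m is the minimum of the nonnegative find positions
    have hmmem : m ∈ F := PySem.List.min?_mem hFe
    have hmle : ∀ y ∈ F, m ≤ y := PySem.List.min?_isMin hFe
    rw [hF, List.mem_filter] at hmmem
    obtain ⟨hmap, hm0'⟩ := hmmem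
    have hm0 : (0 : Int) ≤ m := by simpa using hm0'
    obtain ⟨p, hp, hfp⟩ := List.mem_map.1 hmap
    have hspec := PySem.Chars.find_spec (s := text) (sub := p) (by rw [hfp]; exact hm0)
    have hstep : altScan pats text 0 = some ((0 : Int) + (m.toNat : Nat)) := by
      refine altScan_eq_some pats text 0 m.toNat ⟨p, hp, ?_⟩ ?_
      · rw [← hfp]
        exact hspec.1
      · intro j hj q hq hpre
        have hinf : q <:+: text := hpre.isInfix.trans (List.drop_suffix j text).isInfix
        have hq0 : (0 : Int) ≤ PySem.Chars.find text q := (PySem.Chars.find_nonneg_iff text q).2 hinf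
        have hqF : PySem.Chars.find text q ∈ F := by
          rw [hF, List.mem_filter]
          exact ⟨List.mem_map.2 ⟨q, hq, rfl⟩, by simpa using hq0⟩
        have hmq : m ≤ PySem.Chars.find text q := hmle _ hqF
        -- find text q points at the first occurrence, so find text q ≤ j < m.toNat ≤ m
        have hqspec := PySem.Chars.find_spec (s := text) (sub := q) hq0
        have hjge : (PySem.Chars.find text q).toNat ≤ j := by
          by_contra hlt
          exact hqspec.2 j (by omega) hpre
        omega
    rw [hstep]
    congr 1
    omega

-- ===== VERDICT (by name: the statement is the Claim_ definition above) =====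
theorem window_around_email_py_spec : Claim_equal_window_around_email_py := by
  intro content email_id radius _
  unfold Spec_window_around_email_py window_around_email_py window_around_email_py_alt
    lowerPyA emailPatternsA
  simp only [altScan_eq_min]
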